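-- pv_equiv track=rewrite | github.com/KevinArmbruster/optimal-summaries-public | models/helper.py | get_name_of_feature
-- ===== SOURCE A (Python) =====
-- from typing import List
--
-- summary_dict = {0:'mean', 1:'var', 2:'ever measured', 3:'mean of indicators', 4: 'var of indicators', 5:'# switches', 6:'slope', 7:'slope std err', 8:'first time measured', 9:'last time measured', 10:'hours above threshold', 11:'hours below threshold'}
--
-- def get_name_of_feature(ind: int, changing_variables_names: List[str], seq_len: int = 1, static_variable_names: List[str] = []):
--     # model input row to bottleneck:
--     # Changing_vars per T
--     # Indicators per T
--     # Static features
--     # Summary features per changing_vars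
--
--     variable_name_list = []
--     indicator_names = [f"{name}_ind" for name in changing_variables_names]
--
--     # result is = V1_T1, V2_T1, V3_T1, ..., V1_T2, V2_T2, V3_T2, ... repeat V for T times
--     changing_vars_per_time = [f"{name}_time_{t}" for t in range(1, seq_len + 1) for name in changing_variables_names]
--     indicators_per_time = [f"{name}_time_{t}" for t in range(1, seq_len + 1) for name in indicator_names]
--
--     # create final name list
--     variable_name_list = changing_vars_per_time + indicators_per_time + static_variable_names
--     non_summary_dim = len(variable_name_list)
--
--     # get feature name from lists and summary
--     if ind < non_summary_dim:
--         # raw feature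
--         return variable_name_list[ind], 'raw'
--     else:
--         # summary statistic of feature
--         ind = ind - non_summary_dim
--         summary = ind // len(changing_variables_names)
--         feature = ind % len(changing_variables_names)
--         return changing_variables_names[feature], summary_dict[summary]
-- ===== SOURCE B (Python) =====
-- from typing import List
--
-- summary_dict = {0:'mean', 1:'var', 2:'ever measured', 3:'mean of indicators', 4: 'var of indicators', 5:'# switches', 6:'slope', 7:'slope std err', 8:'first time measured', 9:'last time measured', 10:'hours above threshold', 11:'hours below threshold'}
--
-- def get_name_of_feature(ind: int, changing_variables_names: List[str], seq_len: int = 1, static_variable_names: List[str] = []):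
--     # Locate the section of the flat index by arithmetic and build only the one name:
--     # changing vars per time step, then indicators per time step, then statics, then summaries.
--     n = len(changing_variables_names)
--     block = n * seq_len
--     if ind < block:
--         t, v = divmod(ind, n)
--         return f"{changing_variables_names[v]}_time_{t + 1}", 'raw'
--     if ind < 2 * block:
--         t, v = divmod(ind - block, n)
--         return f"{changing_variables_names[v]}_ind_time_{t + 1}", 'raw'
--     if ind < 2 * block + len(static_variable_names):
--         return static_variable_names[ind - 2 * block], 'raw'
--     s, v = divmod(ind - 2 * block - len(static_variable_names), n)
--     return changing_variables_names[v], summary_dict[s]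
-- ===== Notes on version B (the rewrite author's own statement) =====
-- stated objective: faster
-- what changed: Instead of materialising every feature name (all changing/indicator names for every time step plus statics) into one big list and indexing it, B locates the section of the flat index by divmod arithmetic and builds only the single requested name; Pre_ restricts to the natural domain of a flat feature index (nonnegative ind and seq_len), excluding negative ind, where A's value comes from Python's negative-index wraparound into the materialised list, and negative seq_len, which A silently treats as an empty sequence.
-- outside the precondition, e.g. on get_name_of_feature(-1, ['a'], 1, ['s']): A returns ('s', 'raw'), B returns ('a_time_0', 'raw'); on get_name_of_feature(0, ['a'], -1, []): A returns ('a', 'mean'), B returns ('a', 'ever measured')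
import Mathlib
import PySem

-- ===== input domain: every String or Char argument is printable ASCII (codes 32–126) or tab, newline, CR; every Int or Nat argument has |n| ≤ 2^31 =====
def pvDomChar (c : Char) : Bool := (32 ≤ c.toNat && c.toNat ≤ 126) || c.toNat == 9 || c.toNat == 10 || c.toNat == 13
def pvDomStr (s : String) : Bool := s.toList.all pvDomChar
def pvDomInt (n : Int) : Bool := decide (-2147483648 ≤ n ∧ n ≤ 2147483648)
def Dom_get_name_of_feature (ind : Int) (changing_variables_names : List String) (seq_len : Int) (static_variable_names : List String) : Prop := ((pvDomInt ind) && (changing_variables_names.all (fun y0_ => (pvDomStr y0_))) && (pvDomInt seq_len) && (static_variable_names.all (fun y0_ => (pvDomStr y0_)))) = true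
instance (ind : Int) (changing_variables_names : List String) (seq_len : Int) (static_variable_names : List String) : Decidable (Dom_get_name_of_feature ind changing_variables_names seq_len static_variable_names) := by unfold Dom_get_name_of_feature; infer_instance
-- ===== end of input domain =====

-- B replaces A's materialisation of the full feature-name list by O(1) divmod arithmetic
-- that locates the section and builds only the one requested name (objective: faster).


-- module-level constant summary_dict (shared by both Pythons)
def summaryDict : PySem.Dict Int String := PySem.Dict.ofList
  [(0, "mean"), (1, "var"), (2, "ever measured"), (3, "mean of indicators"),
   (4, "var of indicators"), (5, "# switches"), (6, "slope"), (7, "slope std err"),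
   (8, "first time measured"), (9, "last time measured"),
   (10, "hours above threshold"), (11, "hours below threshold")]

-- ===== PORT A =====
def get_name_of_feature (ind : Int) (changing_variables_names : List String) (seq_len : Int) (static_variable_names : List String) : String × String :=
  let indicator_names := changing_variables_names.map (fun name => name ++ "_ind")
  let changing_vars_per_time := (PySem.List.pyRange 1 (seq_len + 1) 1).flatMap
    (fun t => changing_variables_names.map (fun name => name ++ "_time_" ++ PySem.Int.toStr t))
  let indicators_per_time := (PySem.List.pyRange 1 (seq_len + 1) 1).flatMap
    (fun t => indicator_names.map (fun name => name ++ "_time_" ++ PySem.Int.toStr t))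
  let variable_name_list := changing_vars_per_time ++ indicators_per_time ++ static_variable_names
  let non_summary_dim : Int := PySem.List.len variable_name_list
  if ind < non_summary_dim then
    (PySem.List.pyGetD variable_name_list ind "", "raw")   -- total form; Pre_ excludes the IndexError
  else
    let ind2 := ind - non_summary_dim
    let summary := PySem.Int.floordiv ind2 (PySem.List.len changing_variables_names)
    let feature := PySem.Int.mod ind2 (PySem.List.len changing_variables_names)
    (PySem.List.pyGetD changing_variables_names feature "", summaryDict.getD summary "")  -- Pre_ excludes ZeroDivisionError/KeyError

-- ===== PORT B =====
def get_name_of_feature_alt (ind : Int) (changing_variables_names : List String) (seq_len : Int) (static_variable_names : List String) : String × String :=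
  let n : Int := PySem.List.len changing_variables_names
  let block := n * seq_len
  if ind < block then
    let t := PySem.Int.floordiv ind n
    let v := PySem.Int.mod ind n
    (PySem.List.pyGetD changing_variables_names v "" ++ "_time_" ++ PySem.Int.toStr (t + 1), "raw")
  else if ind < 2 * block then
    let t := PySem.Int.floordiv (ind - block) n
    let v := PySem.Int.mod (ind - block) n
    (PySem.List.pyGetD changing_variables_names v "" ++ "_ind_time_" ++ PySem.Int.toStr (t + 1), "raw")
  else if ind < 2 * block + PySem.List.len static_variable_names then
    (PySem.List.pyGetD static_variable_names (ind - 2 * block) "", "raw")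
  else
    let s := PySem.Int.floordiv (ind - 2 * block - PySem.List.len static_variable_names) n
    let v := PySem.Int.mod (ind - 2 * block - PySem.List.len static_variable_names) n
    (PySem.List.pyGetD changing_variables_names v "", summaryDict.getD s "")

-- ===== PRECONDITION & SPEC =====
-- Pre_ restricts to the natural domain of a flat feature index: it excludes negative ind (A's
-- value there comes from Python's negative-index wraparound into the materialised list) and
-- negative seq_len (which A silently treats as an empty sequence), and the inputs on which A
-- raises (ZeroDivisionError / KeyError in the summary branch).
def Pre_get_name_of_feature (ind : Int) (changing_variables_names : List String) (seq_len : Int) (static_variable_names : List String) : Prop :=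
  let nsd : Int := 2 * changing_variables_names.length * seq_len + static_variable_names.length;
  0 ≤ ind ∧ 0 ≤ seq_len ∧ (nsd ≤ ind → 0 < changing_variables_names.length ∧ ind - nsd < 12 * changing_variables_names.length)
instance (ind : Int) (changing_variables_names : List String) (seq_len : Int) (static_variable_names : List String) : Decidable (Pre_get_name_of_feature ind changing_variables_names seq_len static_variable_names) := by unfold Pre_get_name_of_feature; infer_instance

def pvWitness_get_name_of_feature : Int × List String × Int × List String := (3, ["hr", "bp"], 2, ["age"])

def Spec_get_name_of_feature (ind : Int) (changing_variables_names : List String) (seq_len : Int) (static_variable_names : List String) (out : String × String) : Prop := out = get_name_of_feature_alt ind changing_variables_names seq_len static_variable_names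
instance (ind : Int) (changing_variables_names : List String) (seq_len : Int) (static_variable_names : List String) (out : String × String) : Decidable (Spec_get_name_of_feature ind changing_variables_names seq_len static_variable_names out) := by unfold Spec_get_name_of_feature; infer_instance

-- ===== CLAIM (what is proved, stated in full; the proofs are below) =====
def Claim_equal_get_name_of_feature : Prop := ∀ (ind : Int) (changing_variables_names : List String) (seq_len : Int) (static_variable_names : List String), Dom_get_name_of_feature ind changing_variables_names seq_len static_variable_names → Pre_get_name_of_feature ind changing_variables_names seq_len static_variable_names → Spec_get_name_of_feature ind changing_variables_names seq_len static_variable_names (get_name_of_feature ind changing_variables_names seq_len static_variable_names)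

-- ===== LEMMAS AND PROOFS =====

theorem flatMap_map_getElem? {α β γ : Type} (ts : List α) (L : List β) (f : α → β → γ)
    (k : Nat) (hL : 0 < L.length) :
    (ts.flatMap (fun t => L.map (f t)))[k]? =
      (ts[k / L.length]?).bind (fun t => (L[k % L.length]?).map (f t)) := by
  induction ts generalizing k with
  | nil => simp
  | cons t ts ih =>
    rw [List.flatMap_cons]
    by_cases hk : k < L.length
    · rw [List.getElem?_append_left (by simpa using hk), Nat.div_eq_of_lt hk, Nat.mod_eq_of_lt hk]
      simp
    · rw [Nat.not_lt] at hk
      rw [List.getElem?_append_right (by simpa using hk), List.length_map,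
        ih (k - L.length), Nat.div_eq_sub_div hL hk, Nat.mod_eq_sub_mod hk]
      simp

theorem flatMap_map_length {α : Type} (ts : List α) (L : List String) (f : α → String → String) :
    (ts.flatMap (fun t => L.map (f t))).length = ts.length * L.length := by
  rw [List.length_flatMap]
  simp [List.map_const', List.sum_replicate, smul_eq_mul]

theorem vnl_getElem? (cv sv : List String) (seq_len : Int) (k : Nat)
    (hk : k < 2 * (seq_len.toNat * cv.length) + sv.length) :
    ((PySem.List.pyRange 1 (seq_len + 1) 1).flatMap
        (fun t => cv.map (fun name => name ++ "_time_" ++ PySem.Int.toStr t)) ++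
      (PySem.List.pyRange 1 (seq_len + 1) 1).flatMap
        (fun t => (cv.map (fun name => name ++ "_ind")).map
          (fun name => name ++ "_time_" ++ PySem.Int.toStr t)) ++ sv)[k]? =
    some (if k < seq_len.toNat * cv.length then
            cv.getD (k % cv.length) "" ++ "_time_" ++ PySem.Int.toStr ((k / cv.length : Nat) + 1)
          else if k < 2 * (seq_len.toNat * cv.length) then
            (cv.getD ((k - seq_len.toNat * cv.length) % cv.length) "" ++ "_ind") ++ "_time_" ++
              PySem.Int.toStr (((k - seq_len.toNat * cv.length) / cv.length : Nat) + 1)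
          else sv.getD (k - 2 * (seq_len.toNat * cv.length)) "") := by
  have hrg : PySem.List.pyRange 1 (seq_len + 1) 1
      = (List.range seq_len.toNat).map (fun j => (1:Int)+↑j) := by
    rw [PySem.List.pyRange_one]; norm_num
  set S := seq_len.toNat with hS
  set n := cv.length with hn
  rw [hrg]
  set cvt := ((List.range S).map (fun j => (1:Int)+↑j)).flatMap
      (fun t => cv.map (fun name => name ++ "_time_" ++ PySem.Int.toStr t)) with hcvt
  set ivt := ((List.range S).map (fun j => (1:Int)+↑j)).flatMap
      (fun t => (cv.map (fun name => name ++ "_ind")).map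
        (fun name => name ++ "_time_" ++ PySem.Int.toStr t)) with hivt
  have hlen1 : cvt.length = S * n := by
    rw [hcvt, flatMap_map_length]; simp [hn]
  have hlen2 : ivt.length = S * n := by
    rw [hivt, flatMap_map_length]; simp [hn]
  have hB : ∃ B, S * n = B := ⟨S * n, rfl⟩
  obtain ⟨B, hB⟩ := hB
  rw [hB] at hk hlen1 hlen2 ⊢
  by_cases h1 : k < B
  · have hn0 : 0 < n := by
      rcases Nat.eq_zero_or_pos n with h | h
      · rw [h, Nat.mul_zero] at hB; omega
      · exact h
    rw [List.getElem?_append_left (by simp only [List.length_append]; omega),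
      List.getElem?_append_left (by omega),
      hcvt, flatMap_map_getElem? _ _ _ k (by omega)]
    rw [← hn, List.getElem?_map, List.getElem?_range (Nat.div_lt_of_lt_mul (by rw [Nat.mul_comm n S, hB]; omega)),
      List.getElem?_eq_getElem (l := cv) (Nat.mod_lt _ hn0)]
    simp only [Option.map_some, Option.bind_some]
    rw [if_pos h1, List.getD_eq_getElem cv "" (Nat.mod_lt _ hn0)]
    congr 2
    push_cast
    ring_nf
  · rw [Nat.not_lt] at h1
    by_cases h2 : k < 2 * B
    · have hn0 : 0 < n := by
        rcases Nat.eq_zero_or_pos n with h | h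
        · rw [h, Nat.mul_zero] at hB; omega
        · exact h
      rw [List.getElem?_append_left (by simp only [List.length_append]; omega),
        List.getElem?_append_right (by omega), hlen1,
        hivt, flatMap_map_getElem? _ _ _ (k - B) (by simpa using hn0)]
      rw [List.length_map, ← hn, List.getElem?_map,
        List.getElem?_range (Nat.div_lt_of_lt_mul (by rw [Nat.mul_comm n S, hB]; omega)),
        List.getElem?_map, List.getElem?_eq_getElem (l := cv) (Nat.mod_lt _ hn0)]
      simp only [Option.map_some, Option.bind_some]
      rw [if_neg (by omega), if_pos h2, List.getD_eq_getElem cv "" (Nat.mod_lt _ hn0)]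
      congr 2
      push_cast
      ring_nf
    · rw [Nat.not_lt] at h2
      rw [List.getElem?_append_right (by simp only [List.length_append]; omega),
        List.length_append, hlen1, hlen2]
      have hk' : k - (B + B) < sv.length := by omega
      rw [List.getElem?_eq_getElem hk', if_neg (by omega), if_neg (by omega),
        List.getD_eq_getElem sv "" (by omega)]
      simp only [Nat.two_mul]

-- ===== VERDICT (by name: the statement is the Claim_ definition above) =====
theorem get_name_of_feature_spec : Claim_equal_get_name_of_feature := by
  intro ind cv s sv _ hpre
  unfold Pre_get_name_of_feature at hpre
  unfold Spec_get_name_of_feature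
  obtain ⟨hind0, hseq0, hsum⟩ := hpre
  have hrg : PySem.List.pyRange 1 (s + 1) 1
      = (List.range s.toNat).map (fun j => (1:Int)+↑j) := by
    rw [PySem.List.pyRange_one]; norm_num
  set S := s.toNat with hS
  set n := cv.length with hn
  have hs : s = (S : Int) := (Int.toNat_of_nonneg hseq0).symm
  simp only [get_name_of_feature, get_name_of_feature_alt, hrg, PySem.List.len_eq, ← hn]
  set cvt := ((List.range S).map (fun j => (1:Int)+↑j)).flatMap
      (fun t => cv.map (fun name => name ++ "_time_" ++ PySem.Int.toStr t)) with hcvt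
  set ivt := ((List.range S).map (fun j => (1:Int)+↑j)).flatMap
      (fun t => (cv.map (fun name => name ++ "_ind")).map
        (fun name => name ++ "_time_" ++ PySem.Int.toStr t)) with hivt
  have hlen1 : cvt.length = S * n := by rw [hcvt, flatMap_map_length]; simp [hn]
  have hlen2 : ivt.length = S * n := by rw [hivt, flatMap_map_length]; simp [hn]
  obtain ⟨SN, hSN⟩ : ∃ m : Nat, S * n = m := ⟨_, rfl⟩
  rw [hSN] at hlen1 hlen2
  have hvl : (cvt ++ ivt ++ sv).length = 2 * SN + sv.length := by
    simp only [List.length_append]; omega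
  have hblock : (n : Int) * s = (SN : Int) := by rw [hs, ← hSN]; push_cast; ring
  have hEc : ((2 * SN + sv.length : Nat) : Int) = 2 * (SN : Int) + (sv.length : Int) := by
    push_cast; ring
  rw [hvl, hblock, hEc]
  rw [show (2:Int) * ↑n * s + ↑sv.length = 2 * (SN : Int) + (sv.length : Int) by
    rw [hs, ← hSN]; push_cast; ring] at hsum
  by_cases hge : 2 * (SN : Int) + (sv.length : Int) ≤ ind
  · -- summary-statistic branch on both sides
    rw [if_neg (by omega), if_neg (show ¬ ind < (SN : Int) by omega),
      if_neg (show ¬ ind < 2 * (SN : Int) by omega),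
      if_neg (show ¬ ind < 2 * (SN : Int) + (sv.length : Int) by omega),
      show ind - 2 * (SN : Int) - (sv.length : Int)
        = ind - (2 * (SN : Int) + (sv.length : Int)) by ring]
  · -- raw-feature branch: both sides read the k-th name, k the flat index
    rw [not_le] at hge
    obtain ⟨k, hik, hk⟩ : ∃ k : Nat, ind = (k : Int) ∧ k < 2 * SN + sv.length :=
      ⟨ind.toNat, by omega, by omega⟩
    have hAval : PySem.List.pyGetD (cvt ++ ivt ++ sv) ind ""
        = (cvt ++ ivt ++ sv)[k]'(by rw [hvl]; exact hk) := by
      rw [PySem.List.pyGetD_eq_getElem _ "" (by omega) (by rw [hvl]; push_cast; omega)]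
      congr 1
      omega
    have hvk := vnl_getElem? cv sv s k
      (by have h := hk; rw [← hSN] at h; exact h)
    rw [← hS, ← hn, hrg, ← hcvt, ← hivt, hSN,
      List.getElem?_eq_getElem (by rw [hvl]; exact hk), Option.some_inj] at hvk
    rw [if_pos (by omega), hAval, hvk]
    by_cases hb1 : k < SN
    · have hn0 : 0 < n := by
        rcases Nat.eq_zero_or_pos n with h | h
        · rw [h, Nat.mul_zero] at hSN; omega
        · exact h
      rw [if_pos hb1, if_pos (show ind < (SN : Int) by omega), hik]
      rw [PySem.Int.mod_natCast, PySem.Int.floordiv_natCast, PySem.List.pyGetD_natCast,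
        List.getD_eq_getElem cv "" (Nat.mod_lt _ hn0)]
    · by_cases hb2 : k < 2 * SN
      · have hn0 : 0 < n := by
          rcases Nat.eq_zero_or_pos n with h | h
          · rw [h, Nat.mul_zero] at hSN; omega
          · exact h
        rw [if_neg hb1, if_pos hb2,
          if_neg (show ¬ ind < (SN : Int) by omega),
          if_pos (show ind < 2 * (SN : Int) by omega), hik]
        rw [show ((k : Nat) : Int) - (SN : Int) = ((k - SN : Nat) : Int) by omega]
        rw [PySem.Int.mod_natCast, PySem.Int.floordiv_natCast, PySem.List.pyGetD_natCast,
          List.getD_eq_getElem cv "" (Nat.mod_lt _ hn0),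
          String.append_assoc (s₁ := cv[(k - SN) % cv.length]'(Nat.mod_lt _ hn0)) (s₂ := "_ind") (s₃ := "_time_"),
          show ("_ind" : String) ++ "_time_" = "_ind_time_" from by decide]
      · rw [if_neg hb1, if_neg hb2,
          if_neg (show ¬ ind < (SN : Int) by omega),
          if_neg (show ¬ ind < 2 * (SN : Int) by omega),
          if_pos (show ind < 2 * (SN : Int) + (sv.length : Int) by omega), hik]
        rw [show ((k : Nat) : Int) - 2 * (SN : Int) = ((k - 2 * SN : Nat) : Int) by omega,
          PySem.List.pyGetD_natCast]
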